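-- pv_equiv track=rewrite | github.com/jiachzou/panel_CPD | core.py | fuzzy_join
-- ===== SOURCE A (Python) =====
-- from collections import Counter
--
-- def fuzzy_join(A, N):
--     """
--     Perform fuzzy join operation on multiple lists.
--
--     Parameters:
--     -----------
--     A : list
--         List of input lists.
--     N : int
--         Number of lists to be considered for the join.
--
--     Returns:
--     --------
--     list
--         List of selected elements after the fuzzy join operation.
--
--     """
--     maxlen = max(len(r) for r in A)
--     selected = []
--     for i in range(maxlen):
--         comp = []
--         for j in range(N):
--             if i < len(A[j]):
--                 comp.append(A[j][i])
--
--         ct = Counter(comp)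
--
--         selected.append(ct.most_common(1)[0][0])
--     return list(set(selected))
-- ===== SOURCE B (Python) =====
-- def fuzzy_join(A, N):
--     maxlen = max(len(r) for r in A)
--     counts = [{} for _ in range(maxlen)]
--     for row in A[:N]:
--         for i, x in enumerate(row):
--             c = counts[i]
--             c[x] = c.get(x, 0) + 1
--     selected = [max(c, key=c.get) for c in counts]
--     return list(set(selected))
-- ===== Notes on version B (the rewrite author's own statement) =====
-- stated objective: alternative
-- what changed: A rescans the first N rows for every position (building a fresh column list and Counter per position); B makes one row-major pass over A[:N] filling per-position count dicts, then selects each position's first-maximal key, so ragged short rows are never rescanned per position.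
-- crash fix: On a nonempty A containing a nonempty row, A raises IndexError when N > len(A) (indexing A[j]) and when N < 0 with A[:N] still containing a maximal-length row; B counts over the rows A[:N] and returns the per-position majorities there. — e.g. on fuzzy_join([[5]], 2): A raises IndexError, B returns [5]
import Mathlib
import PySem

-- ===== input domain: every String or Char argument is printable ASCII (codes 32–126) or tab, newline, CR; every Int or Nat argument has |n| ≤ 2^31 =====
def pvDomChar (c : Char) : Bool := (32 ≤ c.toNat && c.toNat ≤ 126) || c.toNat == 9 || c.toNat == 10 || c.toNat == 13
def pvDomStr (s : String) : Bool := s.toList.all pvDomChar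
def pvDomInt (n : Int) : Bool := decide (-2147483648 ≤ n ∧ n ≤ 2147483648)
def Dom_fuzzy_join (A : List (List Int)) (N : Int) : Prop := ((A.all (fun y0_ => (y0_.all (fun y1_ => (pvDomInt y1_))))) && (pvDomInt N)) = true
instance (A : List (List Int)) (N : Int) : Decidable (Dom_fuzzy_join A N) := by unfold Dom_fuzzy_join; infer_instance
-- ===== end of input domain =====

-- B replaces A's per-position rescans of the first N rows (building a fresh column list and
-- Counter for every position) by one row-major pass filling per-position dicts, then a selection
-- pass; same results, single traversal of the data.

-- ===== PORT A =====
def fuzzy_join (A : List (List Int)) (N : Int) : List Int :=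
  let maxlen : Int := (PySem.List.max? (A.map (fun r => (r.length : Int))) (fun x => x)).getD 0
  let selected : List Int :=
    (PySem.List.pyRange 0 maxlen 1).foldl (fun sel i =>
      let comp : List Int :=
        (PySem.List.pyRange 0 N 1).foldl (fun comp j =>
          if i < ((PySem.List.pyGetD A j []).length : Int) then
            comp ++ [PySem.List.pyGetD (PySem.List.pyGetD A j []) i 0]
          else comp) []
      let ct := PySem.Dict.counter comp
      sel ++ [((PySem.List.max? ct.items (fun p => p.2)).getD (0, 0)).1]) []
  PySem.Set.ofList selected

-- ===== PORT B =====
def fuzzy_join_alt (A : List (List Int)) (N : Int) : List Int :=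
  let maxlen : Int := (PySem.List.max? (A.map (fun r => (r.length : Int))) (fun x => x)).getD 0
  let counts : List (PySem.Dict Int Int) :=
    (PySem.List.slice A none (some N)).foldl
      (fun cs row =>
        (PySem.List.enumerate row).foldl
          (fun cs p =>
            PySem.List.pySetD cs p.1
              ((PySem.List.pyGetD cs p.1 PySem.Dict.empty).modify p.2 0 (· + 1)))
          cs)
      (List.replicate maxlen.toNat PySem.Dict.empty)
  let selected : List Int :=
    counts.map (fun c => (PySem.List.max? c.keys (fun k => c.getD k 0)).getD 0)
  PySem.Set.ofList selected

-- ===== PRECONDITION & SPEC =====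
-- the largest row length of A (0 for an empty A); a shape measure used only by Pre_/Raises_
def pvMaxLen (A : List (List Int)) : Nat := A.foldl (fun m r => max m r.length) 0

-- Pre_ excludes exactly the inputs on which the Python A raises: the empty A (ValueError from
-- max), and — when some row is nonempty — N outside 1..len(A) (IndexError indexing A[j]) or
-- first-N rows not reaching the global max length (IndexError from most_common on an empty Counter).
def Pre_fuzzy_join (A : List (List Int)) (N : Int) : Prop :=
  A ≠ [] ∧ (pvMaxLen A = 0 ∨
    (1 ≤ N ∧ N ≤ (A.length : Int) ∧ pvMaxLen (A.take N.toNat) = pvMaxLen A))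
instance (A : List (List Int)) (N : Int) : Decidable (Pre_fuzzy_join A N) := by
  unfold Pre_fuzzy_join; infer_instance
def pvWitness_fuzzy_join : List (List Int) × Int := ([[1, 2], [1]], 2)

-- On a nonempty A with a nonempty row, A raises (IndexError) when N > len(A), and when N < 0 with
-- A[:N] still containing a row of maximal length; B simply counts over the rows A[:N] and returns
-- the per-position majorities there.
def Raises_fuzzy_join (A : List (List Int)) (N : Int) : Prop :=
  A ≠ [] ∧ pvMaxLen A ≠ 0 ∧
    ((A.length : Int) < N ∨ (N < 0 ∧ pvMaxLen (PySem.List.slice A none (some N)) = pvMaxLen A))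
instance (A : List (List Int)) (N : Int) : Decidable (Raises_fuzzy_join A N) := by
  unfold Raises_fuzzy_join; infer_instance
def pvRaiseWitness_fuzzy_join : List (List Int) × Int := ([[5]], 2)
def pvRaiseWitnessOut_fuzzy_join : List Int := [5]

def Spec_fuzzy_join (A : List (List Int)) (N : Int) (out : List Int) : Prop := out = fuzzy_join_alt A N
instance (A : List (List Int)) (N : Int) (out : List Int) : Decidable (Spec_fuzzy_join A N out) := by unfold Spec_fuzzy_join; infer_instance

-- ===== CLAIM (what is proved, stated in full; the proofs are below) =====
def Claim_equal_fuzzy_join : Prop := ∀ (A : List (List Int)) (N : Int), Dom_fuzzy_join A N → Pre_fuzzy_join A N → Spec_fuzzy_join A N (fuzzy_join A N)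
def Claim_raises_fuzzy_join : Prop := (∀ (A : List (List Int)) (N : Int), Dom_fuzzy_join A N → Raises_fuzzy_join A N → ¬ Pre_fuzzy_join A N) ∧ (Dom_fuzzy_join (pvRaiseWitness_fuzzy_join.1) (pvRaiseWitness_fuzzy_join.2) ∧ Raises_fuzzy_join (pvRaiseWitness_fuzzy_join.1) (pvRaiseWitness_fuzzy_join.2) ∧ fuzzy_join_alt (pvRaiseWitness_fuzzy_join.1) (pvRaiseWitness_fuzzy_join.2) = pvRaiseWitnessOut_fuzzy_join)

-- ===== LEMMAS AND PROOFS =====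


-- max? over a mapped list
theorem pv_max?_map {α β κ : Type} [LT κ] [DecidableLT κ] (f : α → β) (key : β → κ) (l : List α) :
    PySem.List.max? (l.map f) key = (PySem.List.max? l (fun x => key (f x))).map f := by
  suffices h : ∀ (acc : Option α),
      List.foldl (fun acc x => match acc with | none => some x | some m => if key m < key x then some x else some m) (acc.map f) (l.map f)
      = (List.foldl (fun acc x => match acc with | none => some x | some m => if key (f m) < key (f x) then some x else some m) acc l).map f by
    simpa [PySem.List.max?] using h none
  induction l with
  | nil => intro acc; rfl
  | cons x t ih =>
    intro acc
    cases acc with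
    | none => simpa using ih (some x)
    | some m =>
      by_cases h : key (f m) < key (f x) <;> simp [h] <;> [exact ih (some x); exact ih (some m)]

-- an append-if loop builds filter+map
theorem pv_foldl_append_ite {α : Type} (p : α → Prop) [DecidablePred p] (f : α → Int) :
    ∀ (R : List α) (acc : List Int),
      R.foldl (fun a r => if p r then a ++ [f r] else a) acc
        = acc ++ (R.filter (fun r => decide (p r))).map f := by
  intro R
  induction R with
  | nil => simp
  | cons r R ih =>
    intro acc
    by_cases h : p r <;> simp [h, ih]

-- a conditional state-update loop is a fold over filter+map
theorem pv_foldl_ite_filter {α β : Type} (p : α → Prop) [DecidablePred p] (f : α → Int) (g : β → Int → β) :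
    ∀ (R : List α) (init : β),
      R.foldl (fun c r => if p r then g c (f r) else c) init
        = ((R.filter (fun r => decide (p r))).map f).foldl g init := by
  intro R
  induction R with
  | nil => simp
  | cons r R ih =>
    intro init
    by_cases h : p r <;> simp [h, ih]

-- the rows produced by 'A[j] for j in range(n)' (getD form): A's first n rows padded with []
theorem pv_rangeMap_getD : ∀ (A : List (List Int)) (n : Nat),
    (List.range n).map (fun k => A.getD k []) = A.take n ++ List.replicate (n - A.length) [] := by
  intro A
  induction A with
  | nil => intro n; simp [List.map_const']
  | cons a A ih =>
    intro n
    cases n with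
    | zero => simp
    | succ m =>
      rw [List.range_succ_eq_map]
      simp only [List.take_succ_cons, List.length_cons, List.getD]
      rw [show (m + 1 - (A.length + 1)) = m - A.length from by omega]
      simpa [List.getD] using ih m

-- B's inner enumerate loop as one state update, and its row-major outer loop column-wise
def pvStep (cs : List (PySem.Dict Int Int)) (p : Int × Int) : List (PySem.Dict Int Int) :=
  PySem.List.pySetD cs p.1 ((PySem.List.pyGetD cs p.1 PySem.Dict.empty).modify p.2 0 (· + 1))

def pvProcRow (cs : List (PySem.Dict Int Int)) (row : List Int) : List (PySem.Dict Int Int) :=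
  (PySem.List.enumerate row).foldl pvStep cs

def pvColStep (k : Nat) (c : PySem.Dict Int Int) (row : List Int) : PySem.Dict Int Int :=
  if (k : Int) < (row.length : Int) then c.modify (row.getD k 0) 0 (· + 1) else c

theorem pv_length_procRow_aux : ∀ (row : List Int) (s : Int) (cs : List (PySem.Dict Int Int)),
    ((PySem.List.enumerate row s).foldl pvStep cs).length = cs.length := by
  intro row
  induction row with
  | nil => intro s cs; simp [PySem.List.enumerate_nil]
  | cons x t ih =>
    intro s cs
    rw [PySem.List.enumerate_cons]
    simp only [List.foldl_cons]
    rw [ih]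
    simp [pvStep, PySem.List.length_pySetD]

theorem pv_getD_procRow_aux : ∀ (row : List Int) (s : Nat) (cs : List (PySem.Dict Int Int)) (k : Nat),
    k < cs.length →
    ((PySem.List.enumerate row (s : Int)).foldl pvStep cs).getD k PySem.Dict.empty =
      if s ≤ k ∧ k < s + row.length then
        (cs.getD k PySem.Dict.empty).modify (row.getD (k - s) 0) 0 (· + 1)
      else cs.getD k PySem.Dict.empty := by
  intro row
  induction row with
  | nil =>
    intro s cs k hk
    rw [PySem.List.enumerate_nil]
    simp only [List.foldl_nil, List.length_nil]
    rw [if_neg (by omega)]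
  | cons x t ih =>
    intro s cs k hk
    rw [PySem.List.enumerate_cons]
    simp only [List.foldl_cons]
    have hstep : pvStep cs ((s : Int), x) = cs.set s ((cs.getD s PySem.Dict.empty).modify x 0 (· + 1)) := by
      simp [pvStep, PySem.List.pySetD_natCast, PySem.List.pyGetD_natCast]
    have hcast : (s : Int) + 1 = ((s + 1 : Nat) : Int) := by push_cast; ring
    rw [hstep, hcast, ih (s + 1) _ k (by simpa using hk)]
    by_cases hks : k = s
    · subst hks
      rw [if_neg (by omega), if_pos (by simp only [List.length_cons]; omega)]
      simp [List.getD, List.getElem?_set_self' ]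
      rw [List.getElem?_eq_getElem hk]
      simp
    · have hset : (cs.set s ((cs.getD s PySem.Dict.empty).modify x 0 (· + 1))).getD k PySem.Dict.empty
          = cs.getD k PySem.Dict.empty := by
        simp [List.getD, List.getElem?_set_ne (by omega : s ≠ k)]
      rw [hset]
      by_cases hin : s + 1 ≤ k ∧ k < s + 1 + t.length
      · rw [if_pos hin, if_pos (by simp only [List.length_cons]; omega)]
        have : k - s = (k - (s + 1)) + 1 := by omega
        rw [this, List.getD_cons_succ]
      · rw [if_neg hin, if_neg (by simp only [List.length_cons]; omega)]

theorem pv_length_rows : ∀ (R : List (List Int)) (cs : List (PySem.Dict Int Int)),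
    (R.foldl pvProcRow cs).length = cs.length := by
  intro R
  induction R with
  | nil => intro cs; rfl
  | cons row R ih =>
    intro cs
    simp only [List.foldl_cons]
    rw [ih, pvProcRow, pv_length_procRow_aux]

theorem pv_getD_rows : ∀ (R : List (List Int)) (cs : List (PySem.Dict Int Int)) (k : Nat),
    k < cs.length →
    (R.foldl pvProcRow cs).getD k PySem.Dict.empty
      = R.foldl (pvColStep k) (cs.getD k PySem.Dict.empty) := by
  intro R
  induction R with
  | nil => intro cs k hk; rfl
  | cons row R ih =>
    intro cs k hk
    simp only [List.foldl_cons]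
    rw [ih _ k (by rw [pvProcRow, pv_length_procRow_aux]; exact hk)]
    congr 1
    have h0 := pv_getD_procRow_aux row 0 cs k hk
    simp only [Nat.cast_zero, Nat.zero_add, Nat.sub_zero] at h0
    rw [pvProcRow]
    norm_num at h0 ⊢
    rw [h0]
    rw [pvColStep]
    by_cases hlt : k < row.length
    · rw [if_pos (by omega), if_pos (by exact_mod_cast hlt)]
      simp [List.getD]
    · rw [if_neg (by omega), if_neg (by exact_mod_cast hlt)]

-- the two selection rules agree on any counter: A's most_common(1)[0][0] and B's max(c, key=c.get)
theorem pv_val_eq (comp : List Int) :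
    ((PySem.List.max? (PySem.Dict.counter comp).items (fun p => p.2)).getD (0, 0)).1
      = (PySem.List.max? (PySem.Dict.counter comp).keys
          (fun k => (PySem.Dict.counter comp).getD k 0)).getD 0 := by
  rw [PySem.Dict.items_counter, PySem.Dict.keys_counter, pv_max?_map]
  have hkey : (fun k => (PySem.Dict.counter comp).getD k 0) = fun k => ((comp.count k : Int)) := by
    funext k; exact PySem.Dict.getD_counter comp k
  rw [hkey]
  have : (fun x => ((fun k => (k, ((comp.count k : Nat) : Int))) x).2) = fun x => ((comp.count x : Int)) := rfl
  rw [this]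
  cases h : PySem.List.max? (PySem.Set.ofList comp) (fun x => ((comp.count x : Int))) <;> simp

theorem pv_map_eq_range_map {γ δ : Type} (l : List γ) (d : γ) (f : γ → δ) :
    l.map f = (List.range l.length).map (fun k => f (l.getD k d)) := by
  apply List.ext_getElem
  · simp
  · intro i p
    have hi : i < l.length := by simpa using p
    simp [List.getD, hi]

theorem pv_maxlen_nonneg (A : List (List Int)) :
    0 ≤ (PySem.List.max? (A.map (fun r => (r.length : Int))) (fun x => x)).getD 0 := by
  cases h : PySem.List.max? (A.map (fun r => (r.length : Int))) (fun x => x) with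
  | none => simp
  | some m =>
    have := PySem.List.max?_mem h
    simp only [List.mem_map] at this
    obtain ⟨r, _, rfl⟩ := this
    simp

-- B's column fold at position k is the Counter of the column list
theorem pv_colfold (R : List (List Int)) (k : Nat) :
    R.foldl (pvColStep k) PySem.Dict.empty
      = PySem.Dict.counter
          ((R.filter (fun r => decide ((k : Int) < (r.length : Int)))).map (fun r => r.getD k 0)) := by
  have h := pv_foldl_ite_filter (fun r : List Int => ((k : Int) < (r.length : Int)))
    (fun r => r.getD k 0) (fun (c : PySem.Dict Int Int) x => c.modify x 0 (· + 1)) R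
    PySem.Dict.empty
  rw [PySem.Dict.counter_eq_foldl]
  exact h

-- A's column loop at position k builds the same column list
theorem pv_compA (A : List (List Int)) (n k : Nat) :
    ((List.range n).map (fun (j : Nat) => (j : Int))).foldl (fun comp j =>
        if ((k : Nat) : Int) < ((PySem.List.pyGetD A j []).length : Int) then
          comp ++ [PySem.List.pyGetD (PySem.List.pyGetD A j []) ((k : Nat) : Int) 0]
        else comp) []
    = ((A.take n).filter (fun r => decide ((k : Int) < (r.length : Int)))).map
        (fun r => r.getD k 0) := by
  have h1 : ((List.range n).map (fun (j : Nat) => (j : Int))).foldl (fun comp j =>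
        if ((k : Nat) : Int) < ((PySem.List.pyGetD A j []).length : Int) then
          comp ++ [PySem.List.pyGetD (PySem.List.pyGetD A j []) ((k : Nat) : Int) 0]
        else comp) []
      = (List.range n).foldl (fun comp j =>
        if ((k : Nat) : Int) < ((PySem.List.pyGetD A ((j : Nat) : Int) []).length : Int) then
          comp ++ [PySem.List.pyGetD (PySem.List.pyGetD A ((j : Nat) : Int) []) ((k : Nat) : Int) 0]
        else comp) [] := by rw [List.foldl_map]
  rw [h1]
  simp only [PySem.List.pyGetD_natCast]
  have h2 : (List.range n).foldl (fun comp j =>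
        if ((k : Nat) : Int) < (((A.getD j []).length : Nat) : Int) then
          comp ++ [(A.getD j []).getD k 0]
        else comp) []
      = ((List.range n).map (fun j => A.getD j [])).foldl (fun comp r =>
        if ((k : Nat) : Int) < ((r.length : Nat) : Int) then comp ++ [r.getD k 0]
        else comp) [] := by rw [List.foldl_map]
  rw [h2, pv_rangeMap_getD]
  have h3 := pv_foldl_append_ite (fun r : List Int => ((k : Int) < (r.length : Int)))
    (fun r => r.getD k 0) (A.take n ++ List.replicate (n - A.length) []) []
  rw [h3, List.filter_append, List.map_append]
  rw [show (List.replicate (n - A.length) ([] : List Int)).filter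
        (fun r => decide ((k : Int) < (r.length : Int))) = [] from by
      simp]
  simp only [List.map_nil, List.append_nil, List.nil_append]

theorem pv_procRow_eta : (fun (cs : List (PySem.Dict Int Int)) (row : List Int) =>
      (PySem.List.enumerate row).foldl
        (fun cs p =>
          PySem.List.pySetD cs p.1
            ((PySem.List.pyGetD cs p.1 PySem.Dict.empty).modify p.2 0 (· + 1)))
        cs) = pvProcRow := by
  funext cs row; rfl

theorem pv_main_nonneg (A : List (List Int)) (N : Int) (hN : 0 ≤ N) :
    fuzzy_join A N = fuzzy_join_alt A N := by
  obtain ⟨n, rfl⟩ : ∃ n : Nat, N = (n : Int) := ⟨N.toNat, (Int.toNat_of_nonneg hN).symm⟩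
  simp only [fuzzy_join, fuzzy_join_alt]
  obtain ⟨M, hM⟩ : ∃ M : Nat,
      (PySem.List.max? (A.map (fun r => (r.length : Int))) (fun x => x)).getD 0 = (M : Int) :=
    ⟨_, (Int.toNat_of_nonneg (pv_maxlen_nonneg A)).symm⟩
  rw [hM]
  simp only [Int.toNat_natCast]
  congr 1
  -- A side: the position loop is a map over range M
  rw [PySem.List.pyRange_zero_natCast M, List.foldl_map]
  simp only [PySem.List.foldl_append_singleton_eq_map, List.nil_append]
  -- B side: rows are A.take n; selection is a map over range M
  rw [pv_procRow_eta, PySem.List.slice_to_natCast,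
      pv_map_eq_range_map (((A.take n)).foldl pvProcRow (List.replicate M PySem.Dict.empty))
        PySem.Dict.empty]
  rw [pv_length_rows, List.length_replicate]
  apply List.map_congr_left
  intro k hk
  have hkM : k < M := List.mem_range.mp hk
  -- B value at position k
  rw [pv_getD_rows _ _ k (by simpa using hkM)]
  rw [show (List.replicate M (PySem.Dict.empty (κ := Int) (ν := Int))).getD k PySem.Dict.empty
        = PySem.Dict.empty from by simp [List.getD]]
  rw [pv_colfold]
  -- A value at position k: the column list is the same filter+map
  rw [PySem.List.pyRange_zero_natCast n, pv_compA A n k]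
  exact pv_val_eq _

theorem pv_main_zero (A : List (List Int)) (N : Int)
    (h0 : (PySem.List.max? (A.map (fun r => (r.length : Int))) (fun x => x)).getD 0 ≤ 0) :
    fuzzy_join A N = fuzzy_join_alt A N := by
  simp only [fuzzy_join, fuzzy_join_alt]
  rw [PySem.List.pyRange_one_eq_nil h0, Int.toNat_of_nonpos h0]
  simp only [List.replicate_zero, List.foldl_nil, pv_procRow_eta]
  have hlen := pv_length_rows (PySem.List.slice A none (some N)) []
  simp only [List.length_nil] at hlen
  rw [List.eq_nil_of_length_eq_zero hlen]
  rfl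

theorem pv_maxLen_le (A : List (List Int)) (h : pvMaxLen A = 0) :
    (PySem.List.max? (A.map (fun r => (r.length : Int))) (fun x => x)).getD 0 ≤ 0 := by
  cases hm : PySem.List.max? (A.map (fun r => (r.length : Int))) (fun x => x) with
  | none => simp
  | some m =>
    have hmem := PySem.List.max?_mem hm
    simp only [List.mem_map] at hmem
    obtain ⟨r, hr, rfl⟩ := hmem
    have h2 := (PySem.List.le_foldl_max_nat A List.length 0).2 r hr
    simp only [pvMaxLen] at h
    rw [h] at h2
    simp only [Option.getD_some]
    omega

-- ===== VERDICT (by name: the statement is the Claim_ definition above) =====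
theorem fuzzy_join_spec : Claim_equal_fuzzy_join := by
  intro A N _ hpre
  unfold Spec_fuzzy_join
  rcases hpre with ⟨hne, hcase⟩
  rcases hcase with h0 | ⟨h1, _, _⟩
  · exact pv_main_zero A N (pv_maxLen_le A h0)
  · exact pv_main_nonneg A N (by omega)

theorem fuzzy_join_raises : Claim_raises_fuzzy_join := by
  unfold Claim_raises_fuzzy_join
  constructor
  · intro A N _ hr hpre
    rcases hr with ⟨_, hml, hc⟩
    rcases hpre with ⟨_, h0 | ⟨h1, h2, _⟩⟩
    · exact hml h0
    · rcases hc with h | ⟨h, _⟩ <;> omega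
  · exact ⟨by decide, by decide, by decide⟩

-- self-check from the raises claim: the raise-region witness indeed lies outside Pre_
theorem pvRaiseWitness_outside_pre_ok :
    ¬ Pre_fuzzy_join pvRaiseWitness_fuzzy_join.1 pvRaiseWitness_fuzzy_join.2 :=
  fuzzy_join_raises.1 pvRaiseWitness_fuzzy_join.1 pvRaiseWitness_fuzzy_join.2
    fuzzy_join_raises.2.1 fuzzy_join_raises.2.2.1
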